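-- pv_equiv track=rewrite | github.com/vlads4ever/python_homeworks | HomeWork_6/hmwrk_1.py | get_arithmetic_progression
-- ===== SOURCE A (Python) =====
-- def get_arithmetic_progression(param: list[int]) -> list[int]:
--     output_list = list()
--     first_el = param[0]
--     diff = param[1]
--     count = param[2]
--     for i in range(count):
--         output_list.append(first_el + i * diff)
--     return output_list
-- ===== SOURCE B (Python) =====
-- def get_arithmetic_progression(param: list[int]) -> list[int]:
--     current = param[0]
--     diff = param[1]
--     count = param[2]
--     output_list = []
--     for _ in range(count):
--         output_list.append(current)
--         current += diff
--     return output_list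
-- ===== Notes on version B (the rewrite author's own statement) =====
-- stated objective: alternative
-- what changed: Replaces the per-index closed form first_el + i*diff with a running accumulator that starts at param[0] and adds diff after each append, so no multiplication (or loop index) is used.
import Mathlib
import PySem

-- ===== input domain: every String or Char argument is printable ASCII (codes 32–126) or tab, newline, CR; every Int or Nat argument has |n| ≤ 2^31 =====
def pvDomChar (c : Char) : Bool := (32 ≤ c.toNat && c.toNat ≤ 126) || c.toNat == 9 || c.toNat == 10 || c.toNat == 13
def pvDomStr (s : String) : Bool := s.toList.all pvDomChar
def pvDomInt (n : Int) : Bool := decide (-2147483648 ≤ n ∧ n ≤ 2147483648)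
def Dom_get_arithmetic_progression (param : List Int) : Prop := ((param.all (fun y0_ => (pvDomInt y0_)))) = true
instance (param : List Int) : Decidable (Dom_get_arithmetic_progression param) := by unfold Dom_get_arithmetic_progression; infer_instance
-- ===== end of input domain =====

-- B replaces the closed-form term first_el + i*diff with a running accumulator updated by += diff (alternative decomposition, same cost).

-- ===== PORT A =====
-- param[0], param[1], param[2] via pyGet? (none = IndexError, excluded by Pre_);
-- the for-loop over range(count) is a foldl appending first_el + i * diff.
def get_arithmetic_progression (param : List Int) : List Int :=
  match PySem.List.pyGet? param 0, PySem.List.pyGet? param 1, PySem.List.pyGet? param 2 with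
  | some first_el, some diff, some count =>
      (PySem.List.pyRange 0 count 1).foldl (fun output_list i => output_list ++ [first_el + i * diff]) []
  | _, _, _ => []

-- ===== PORT B =====
-- the loop body of Source B: append current, then current += diff, repeated count times
def altLoop (current diff : Int) (n : Nat) (output_list : List Int) : List Int :=
  match n with
  | 0 => output_list
  | k + 1 => altLoop (current + diff) diff k (output_list ++ [current])

def get_arithmetic_progression_alt (param : List Int) : List Int :=
  ((PySem.List.pyGet? param 0).bind fun current =>
    (PySem.List.pyGet? param 1).bind fun diff =>
      (PySem.List.pyGet? param 2).map fun count =>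
        altLoop current diff count.toNat []).getD []

-- ===== PRECONDITION & SPEC =====
-- A raises IndexError when param has fewer than 3 elements
def Pre_get_arithmetic_progression (param : List Int) : Prop := 3 ≤ param.length
instance (param : List Int) : Decidable (Pre_get_arithmetic_progression param) := by unfold Pre_get_arithmetic_progression; infer_instance
def pvWitness_get_arithmetic_progression : List Int := [2, 3, 4]

def Spec_get_arithmetic_progression (param : List Int) (out : List Int) : Prop := out = get_arithmetic_progression_alt param
instance (param : List Int) (out : List Int) : Decidable (Spec_get_arithmetic_progression param out) := by unfold Spec_get_arithmetic_progression; infer_instance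

-- ===== CLAIM (what is proved, stated in full; the proofs are below) =====
def Claim_equal_get_arithmetic_progression : Prop := ∀ (param : List Int), Dom_get_arithmetic_progression param → Pre_get_arithmetic_progression param → Spec_get_arithmetic_progression param (get_arithmetic_progression param)

-- ===== LEMMAS AND PROOFS =====

theorem foldl_append_map {α β : Type} (f : α → β) :
    ∀ (l : List α) (acc : List β), l.foldl (fun out i => out ++ [f i]) acc = acc ++ l.map f := by
  intro l
  induction l with
  | nil => simp
  | cons x xs ih => intro acc; simp [List.foldl, ih]

theorem altLoop_eq (diff : Int) :
    ∀ (n : Nat) (current : Int) (acc : List Int),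
      altLoop current diff n acc = acc ++ (List.range n).map (fun k : Nat => current + (k : Int) * diff) := by
  intro n
  induction n with
  | zero => intro current acc; simp [altLoop]
  | succ k ih =>
      intro current acc
      rw [altLoop, ih, List.range_succ_eq_map, List.map_cons, List.map_map]
      simp only [Nat.cast_zero, zero_mul, add_zero, List.append_assoc, List.singleton_append]
      congr 2
      apply List.map_congr_left
      intro j _
      simp only [Function.comp_apply]
      push_cast
      ring

theorem ports_agree (first diff count : Int) :
    (PySem.List.pyRange 0 count 1).foldl (fun out i => out ++ [first + i * diff]) [] =
    altLoop first diff count.toNat [] := by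
  rw [PySem.List.pyRange_one, foldl_append_map, altLoop_eq, List.map_map]
  simp only [List.nil_append, Int.sub_zero]
  apply List.map_congr_left
  intro j _
  simp [Function.comp]

-- ===== VERDICT (by name: the statement is the Claim_ definition above) =====
theorem get_arithmetic_progression_spec : Claim_equal_get_arithmetic_progression := by
  intro param _ hpre
  unfold Spec_get_arithmetic_progression get_arithmetic_progression get_arithmetic_progression_alt
  unfold Pre_get_arithmetic_progression at hpre
  match param, hpre with
  | a :: b :: c :: rest, _ =>
      have h0 : PySem.List.pyGet? (a :: b :: c :: rest) 0 = some a := by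
        simp [PySem.List.pyGet?, PySem.List.pyIdx?]
        rw [if_pos (by omega)]
        simp
      have h1 : PySem.List.pyGet? (a :: b :: c :: rest) 1 = some b := by
        simp [PySem.List.pyGet?, PySem.List.pyIdx?]
        rw [if_pos (by omega)]
        simp
      have h2 : PySem.List.pyGet? (a :: b :: c :: rest) 2 = some c := by
        simp [PySem.List.pyGet?, PySem.List.pyIdx?]
        rw [if_pos (by omega)]
        simp
      rw [h0, h1, h2]
      exact ports_agree a b c
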